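-- pv_equiv track=rewrite | github.com/zachgoldfine44/mechinterp-replication | src/utils/datasets.py | _apply_fast_filter
-- ===== SOURCE A (Python) =====
-- from typing import Any
--
-- def _apply_fast_filter(
--     stimuli: list[dict[str, Any]],
--     max_concepts: int = 2,
--     max_per_concept: int = 10,
-- ) -> list[dict[str, Any]]:
--     """Reduce a stimulus list for --fast mode.
--
--     Keeps at most ``max_concepts`` distinct concepts and at most
--     ``max_per_concept`` stimuli per concept.
--
--     Args:
--         stimuli: Full list of stimuli.
--         max_concepts: Maximum number of distinct concepts to keep.
--         max_per_concept: Maximum stimuli per concept.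
--
--     Returns:
--         Filtered list.
--     """
--     # Discover unique concepts in order of first appearance
--     seen_concepts: list[str] = []
--     for s in stimuli:
--         c = s.get("concept", "unknown")
--         if c not in seen_concepts:
--             seen_concepts.append(c)
--
--     keep_concepts = set(seen_concepts[:max_concepts])
--     counts: dict[str, int] = {}
--     filtered: list[dict[str, Any]] = []
--
--     for s in stimuli:
--         c = s.get("concept", "unknown")
--         if c not in keep_concepts:
--             continue
--         counts[c] = counts.get(c, 0) + 1
--         if counts[c] <= max_per_concept:
--             filtered.append(s)
--
--     return filtered
-- ===== SOURCE B (Python) =====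
-- def _apply_fast_filter(
--     stimuli,
--     max_concepts=2,
--     max_per_concept=10,
-- ):
--     """Group-by re-implementation: bucket stimuli by concept (with their
--     original indices) in one pass, slice off the first max_concepts buckets,
--     take the first max_per_concept entries of each, and restore the original
--     order by sorting on the saved indices."""
--     groups = {}
--     for i, s in enumerate(stimuli):
--         groups.setdefault(s.get("concept", "unknown"), []).append((i, s))
--     picked = []
--     for c in list(groups)[:max_concepts]:
--         picked.extend(t for j, t in enumerate(groups[c]) if j < max_per_concept)
--     picked.sort(key=lambda t: t[0])
--     return [s for _, s in picked]
-- ===== Notes on version B (the rewrite author's own statement) =====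
-- stated objective: alternative
-- what changed: Replaces A's two full scans (dedup pass building seen_concepts with an O(n) list-membership test, then a counting filter pass) by a single group-by pass that buckets (index, stimulus) pairs per concept, slices the first max_concepts buckets, truncates each to max_per_concept, and restores the original order by sorting the saved indices.
import Mathlib
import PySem

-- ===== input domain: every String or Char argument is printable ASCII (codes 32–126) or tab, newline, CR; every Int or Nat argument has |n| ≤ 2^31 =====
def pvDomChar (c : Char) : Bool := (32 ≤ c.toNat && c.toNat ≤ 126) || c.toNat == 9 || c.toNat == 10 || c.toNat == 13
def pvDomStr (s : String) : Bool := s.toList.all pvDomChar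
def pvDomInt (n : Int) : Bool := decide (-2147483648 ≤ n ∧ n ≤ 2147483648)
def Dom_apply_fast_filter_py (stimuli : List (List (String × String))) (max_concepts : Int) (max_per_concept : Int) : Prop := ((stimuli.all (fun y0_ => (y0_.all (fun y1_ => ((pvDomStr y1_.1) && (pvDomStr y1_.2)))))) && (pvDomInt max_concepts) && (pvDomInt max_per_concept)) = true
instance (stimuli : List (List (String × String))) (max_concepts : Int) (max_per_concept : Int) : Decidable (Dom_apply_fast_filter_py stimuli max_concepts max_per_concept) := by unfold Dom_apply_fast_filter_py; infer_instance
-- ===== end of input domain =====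

-- B replaces A's two full scans (list-membership dedup pass, then a counting filter pass) by a
-- group-by-concept pass over (index, stimulus) pairs, per-bucket truncation, and an index sort;
-- objective: alternative (genuinely different algorithm, similar cost).

-- ===== PORT A =====
-- s.get("concept", "unknown")  (shared helper: both Pythons read the concept the same way)
def pvConc (s : List (String × String)) : String :=
  (PySem.Dict.mk s).getD "concept" "unknown"

-- A's first loop: seen_concepts (dedup by list membership, in first-appearance order)
def pvSeen (stimuli : List (List (String × String))) : List String :=
  stimuli.foldl (fun acc s =>
    let c := pvConc s
    if c ∈ acc then acc else acc ++ [c]) []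

-- A's second loop: counts dict + filtered list ('continue' = state unchanged)
def pvCountFilter (keep : PySem.Set String) (mp : Int)
    (stimuli : List (List (String × String))) :
    PySem.Dict String Int × List (List (String × String)) :=
  stimuli.foldl (fun st s =>
    let c := pvConc s
    if c ∈ keep then
      let counts := st.1.insert c (st.1.getD c 0 + 1)
      if counts.getD c 0 ≤ mp then (counts, st.2 ++ [s]) else (counts, st.2)
    else st) (PySem.Dict.empty, [])

def apply_fast_filter_py (stimuli : List (List (String × String))) (max_concepts : Int) (max_per_concept : Int) : List (List (String × String)) :=
  let seen := pvSeen stimuli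
  -- keep_concepts = set(seen_concepts[:max_concepts])
  let keep : PySem.Set String := PySem.Set.ofList (PySem.List.slice seen none (some max_concepts))
  (pvCountFilter keep max_per_concept stimuli).2

-- ===== PORT B =====
-- B's grouping loop: groups.setdefault(c, []).append((i, s))
def pvGroups (stimuli : List (List (String × String))) :
    PySem.Dict String (List (Int × List (String × String))) :=
  (PySem.List.enumerate stimuli).foldl
    (fun g p => g.modify (pvConc p.2) [] (fun l => l ++ [p])) PySem.Dict.empty

-- B's picking loop: for c in list(groups)[:mc]: picked.extend(t for j, t in enumerate(groups[c]) if j < mp)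
def pvPicked (groups : PySem.Dict String (List (Int × List (String × String))))
    (mc mp : Int) : List (Int × List (String × String)) :=
  (PySem.List.slice (PySem.Dict.keys groups) none (some mc)).foldl
    (fun acc c => acc ++ (PySem.List.enumerate (groups.getD c [])).foldl
        (fun acc2 q => if q.1 < mp then acc2 ++ [q.2] else acc2) []) []

def apply_fast_filter_py_alt (stimuli : List (List (String × String))) (max_concepts : Int) (max_per_concept : Int) : List (List (String × String)) :=
  let groups := pvGroups stimuli
  let picked := pvPicked groups max_concepts max_per_concept
  -- picked.sort(key=lambda t: t[0]); return [s for _, s in picked]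
  (PySem.List.sorted picked (fun t => t.1)).map (fun t => t.2)

-- ===== PRECONDITION & SPEC =====
def Spec_apply_fast_filter_py (stimuli : List (List (String × String))) (max_concepts : Int) (max_per_concept : Int) (out : List (List (String × String))) : Prop := out = apply_fast_filter_py_alt stimuli max_concepts max_per_concept
instance (stimuli : List (List (String × String))) (max_concepts : Int) (max_per_concept : Int) (out : List (List (String × String))) : Decidable (Spec_apply_fast_filter_py stimuli max_concepts max_per_concept out) := by unfold Spec_apply_fast_filter_py; infer_instance

-- ===== CLAIM (what is proved, stated in full; the proofs are below) =====
def Claim_equal_apply_fast_filter_py : Prop := ∀ (stimuli : List (List (String × String))) (max_concepts : Int) (max_per_concept : Int), Dom_apply_fast_filter_py stimuli max_concepts max_per_concept → Spec_apply_fast_filter_py stimuli max_concepts max_per_concept (apply_fast_filter_py stimuli max_concepts max_per_concept)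

-- ===== LEMMAS AND PROOFS =====

-- selection of A's second loop, phrased recursively: keep s when its concept is in K and was seen
-- fewer than mp times before (pcs = concepts of the already-processed prefix)
def pvSel (K : List String) (mp : Int) : List (List (String × String)) → List String → List (List (String × String))
  | [], _ => []
  | s :: t, pcs =>
      (if pvConc s ∈ K ∧ ((pcs.count (pvConc s) : Int) < mp) then [s] else []) ++
        pvSel K mp t (pcs ++ [pvConc s])

-- the same selection phrased positionally over the enumerated list
def pvP (K : List String) (mp : Int) (cs : List String) (p : Int × List (String × String)) : Bool :=
  decide (pvConc p.2 ∈ K) && decide (((cs.take p.1.toNat).count (pvConc p.2) : Int) < mp)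

def pvE (K : List String) (mp : Int) (stimuli : List (List (String × String))) : List (Int × List (String × String)) :=
  (PySem.List.enumerate stimuli).filter (pvP K mp (stimuli.map pvConc))

lemma pvSel_congr (K K' : List String) (mp : Int) (h : ∀ x, x ∈ K ↔ x ∈ K') :
    ∀ (l : List (List (String × String))) (pcs : List String),
    pvSel K mp l pcs = pvSel K' mp l pcs := by
  intro l
  induction l with
  | nil => intro pcs; rfl
  | cons s t ih =>
      intro pcs
      simp only [pvSel, h]
      rw [ih]

lemma seen_eq (stimuli : List (List (String × String))) :
    pvSeen stimuli = PySem.Set.ofList (stimuli.map pvConc) := by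
  unfold pvSeen
  rw [PySem.List.foldl_congr_mem _ _ (fun acc s => PySem.Set.add acc (pvConc s)) _
        (fun acc s _ => (PySem.Set.add_eq_ite acc (pvConc s)).symm),
      ← PySem.Set.update_map_eq_foldl_add]
  exact PySem.Set.update_empty _

lemma loopA (K : PySem.Set String) (mp : Int) :
    ∀ (l : List (List (String × String))) (pcs : List String)
      (d : PySem.Dict String Int) (out : List (List (String × String))),
    (∀ c ∈ K, d.getD c 0 = (pcs.count c : Int)) →
    (l.foldl (fun st s =>
      let c := pvConc s
      if c ∈ K then
        let counts := st.1.insert c (st.1.getD c 0 + 1)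
        if counts.getD c 0 ≤ mp then (counts, st.2 ++ [s]) else (counts, st.2)
      else st) (d, out)).2 = out ++ pvSel K mp l pcs := by
  intro l
  induction l with
  | nil => intro pcs d out hinv; simp [pvSel]
  | cons s t ih =>
      intro pcs d out hinv
      rw [List.foldl_cons]
      by_cases hK : pvConc s ∈ K
      · have hc : d.getD (pvConc s) 0 = (pcs.count (pvConc s) : Int) := hinv _ hK
        have hinv' : ∀ c ∈ K, (d.insert (pvConc s) (d.getD (pvConc s) 0 + 1)).getD c 0
            = ((pcs ++ [pvConc s]).count c : Int) := by
          intro c hcK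
          rw [PySem.Dict.getD_insert]
          by_cases hcc : c = pvConc s
          · subst hcc
            simp [hc, List.count_append]
          · simp [hcc, hinv c hcK, List.count_append, Ne.symm hcc]
        have hstep : (let c := pvConc s
            if c ∈ K then
              let counts := (d, out).1.insert c ((d, out).1.getD c 0 + 1)
              if counts.getD c 0 ≤ mp then (counts, (d, out).2 ++ [s]) else (counts, (d, out).2)
            else (d, out))
            = if d.getD (pvConc s) 0 + 1 ≤ mp
              then (d.insert (pvConc s) (d.getD (pvConc s) 0 + 1), out ++ [s])
              else (d.insert (pvConc s) (d.getD (pvConc s) 0 + 1), out) := by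
          simp only [if_pos hK, PySem.Dict.getD_insert_self]
        rw [hstep]
        by_cases hle : d.getD (pvConc s) 0 + 1 ≤ mp
        · rw [if_pos hle, ih _ _ _ hinv']
          have hcond : pvConc s ∈ K ∧ ((pcs.count (pvConc s) : Int) < mp) := ⟨hK, by omega⟩
          simp [pvSel, if_pos hcond]
        · rw [if_neg hle, ih _ _ _ hinv']
          have hcond : ¬ (pvConc s ∈ K ∧ ((pcs.count (pvConc s) : Int) < mp)) := by
            rintro ⟨-, hlt⟩; omega
          simp [pvSel, if_neg hcond]
      · have hinv' : ∀ c ∈ K, d.getD c 0 = ((pcs ++ [pvConc s]).count c : Int) := by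
          intro c hcK
          have hne : c ≠ pvConc s := fun he => hK (he ▸ hcK)
          simp [hinv c hcK, List.count_append, Ne.symm hne]
        have hstep : (let c := pvConc s
            if c ∈ K then
              let counts := (d, out).1.insert c ((d, out).1.getD c 0 + 1)
              if counts.getD c 0 ≤ mp then (counts, (d, out).2 ++ [s]) else (counts, (d, out).2)
            else (d, out)) = (d, out) := by
          simp only [if_neg hK]
        rw [hstep, ih _ _ _ hinv']
        have hcond : ¬ (pvConc s ∈ K ∧ ((pcs.count (pvConc s) : Int) < mp)) := by
          rintro ⟨hKs, -⟩; exact hK hKs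
        simp [pvSel, if_neg hcond]

lemma pvSel_append (K : List String) (mp : Int) :
    ∀ (l : List (List (String × String))) (x : List (String × String)) (pcs : List String),
    pvSel K mp (l ++ [x]) pcs = pvSel K mp l pcs ++
      (if pvConc x ∈ K ∧ (((pcs ++ l.map pvConc).count (pvConc x) : Int) < mp) then [x] else []) := by
  intro l
  induction l with
  | nil => intro x pcs; simp [pvSel]
  | cons s t ih =>
      intro x pcs
      have hl : (pcs ++ [pvConc s]) ++ List.map pvConc t = pcs ++ List.map pvConc (s :: t) := by
        simp
      rw [List.cons_append]
      simp only [pvSel]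
      rw [ih, hl, List.append_assoc]

lemma E_eq_sel (K : List String) (mp : Int) :
    ∀ (stimuli : List (List (String × String))),
    (pvE K mp stimuli).map (fun p => p.2) = pvSel K mp stimuli [] := by
  intro stimuli
  induction stimuli using List.reverseRecOn with
  | nil => rfl
  | append_singleton xs x ih =>
      unfold pvE at ih ⊢
      rw [PySem.List.enumerate_append, PySem.List.enumerate_cons, PySem.List.enumerate_nil,
        List.filter_append, List.map_append, pvSel_append]
      congr 1
      · rw [← ih]
        congr 1
        apply List.filter_congr
        intro p hp
        obtain ⟨k, hk, rfl⟩ := (PySem.List.mem_enumerate_iff _ _ _).mp hp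
        unfold pvP
        congr 2
        simp only [zero_add, Int.toNat_natCast, List.map_append]
        rw [List.take_append_of_le_length (by simpa using Nat.le_of_lt hk)]
      · simp only [List.filter_cons, List.filter_nil, pvP, zero_add, Int.toNat_natCast,
          List.map_append, List.nil_append, Bool.and_eq_true, decide_eq_true_eq]
        by_cases h1 : pvConc x ∈ K
        · by_cases h2 : (((xs.map pvConc).count (pvConc x) : Int) < mp)
          · simp [h1, h2]
          · simp [h1, h2]
        · simp [h1]

lemma chunk_eq (c : String) (mp : Int) :
    ∀ (stimuli : List (List (String × String))),
    ((PySem.List.enumerate ((PySem.List.enumerate stimuli).filter (fun p => pvConc p.2 == c))).filter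
        (fun q => decide (q.1 < mp))).map (fun q => q.2)
    = (PySem.List.enumerate stimuli).filter
        (fun p => pvConc p.2 == c && decide ((((stimuli.map pvConc).take p.1.toNat).count c : Int) < mp)) := by
  intro stimuli
  induction stimuli using List.reverseRecOn with
  | nil => rfl
  | append_singleton xs x ih =>
      rw [PySem.List.enumerate_append, PySem.List.enumerate_cons, PySem.List.enumerate_nil,
        List.filter_append, List.filter_append]
      have hcongr_old : (PySem.List.enumerate xs 0).filter
            (fun p => pvConc p.2 == c && decide (((((xs ++ [x]).map pvConc).take p.1.toNat).count c : Int) < mp))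
          = (PySem.List.enumerate xs 0).filter
            (fun p => pvConc p.2 == c && decide ((((xs.map pvConc).take p.1.toNat).count c : Int) < mp)) := by
        apply List.filter_congr
        intro p hp
        obtain ⟨k, hk, rfl⟩ := (PySem.List.mem_enumerate_iff _ _ _).mp hp
        simp only [zero_add, Int.toNat_natCast, List.map_append]
        rw [List.take_append_of_le_length (by simpa using Nat.le_of_lt hk)]
      rw [hcongr_old]
      have hcnt : ((PySem.List.enumerate xs 0).filter (fun p => pvConc p.2 == c)).length
          = (xs.map pvConc).count c := by
        rw [← List.countP_eq_length_filter, List.count_eq_countP,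
          ← PySem.List.map_snd_enumerate xs 0, List.map_map, List.countP_map]
        simp [Function.comp_def]
      by_cases hx : pvConc x = c
      · simp only [List.filter_cons, List.filter_nil, hx, beq_self_eq_true, Bool.true_and,
          if_true]
        rw [PySem.List.enumerate_append, PySem.List.enumerate_cons, PySem.List.enumerate_nil,
          List.filter_append, List.map_append, ih]
        congr 1
        simp only [List.filter_cons, List.filter_nil, List.map_cons, List.map_nil, zero_add,
          Int.toNat_natCast, List.map_append, hcnt]
        by_cases hlt : (((xs.map pvConc).count c : Int) < mp)
        · simp [hlt]
        · simp [hlt]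
      · have hxb : (pvConc x == c) = false := by simp [hx]
        simp only [List.filter_cons, List.filter_nil, hxb, Bool.false_and, Bool.false_eq_true,
          if_false, List.append_nil]
        exact ih

lemma pvFlatMap_congr {α β : Type} {l : List α} {f g : α → List β}
    (h : ∀ x ∈ l, f x = g x) : l.flatMap f = l.flatMap g := by
  induction l with
  | nil => rfl
  | cons a t ih =>
      simp only [List.flatMap_cons, h a (by simp)]
      rw [ih (fun x hx => h x (by simp [hx]))]

lemma perm_flatMap {β : Type} (key : β → String) :
    ∀ (ks : List String) (l : List β), ks.Nodup → (∀ x ∈ l, key x ∈ ks) →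
    (ks.flatMap (fun k => l.filter (fun x => key x == k))).Perm l := by
  intro ks
  induction ks with
  | nil =>
      intro l _ h
      cases l with
      | nil => simp
      | cons a t => exact absurd (h a (by simp)) (by simp)
  | cons k ks ih =>
      intro l hnd h
      obtain ⟨hk, hnd'⟩ := List.nodup_cons.mp hnd
      simp only [List.flatMap_cons]
      have hflat : ks.flatMap (fun k' => l.filter (fun x => key x == k'))
          = ks.flatMap (fun k' => (l.filter (fun x => !(key x == k))).filter (fun x => key x == k')) := by
        apply pvFlatMap_congr
        intro k' hk'
        have hkk : k' ≠ k := fun he => hk (he ▸ hk')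
        rw [List.filter_filter]
        apply List.filter_congr
        intro x _
        by_cases hxk : key x = k'
        · simp [hxk, hkk]
        · simp [hxk]
      rw [hflat]
      have h' : ∀ x ∈ l.filter (fun x => !(key x == k)), key x ∈ ks := by
        intro x hx
        obtain ⟨hxl, hxne⟩ := List.mem_filter.mp hx
        have hne : key x ≠ k := by simpa using hxne
        have hmem := h x hxl
        rw [List.mem_cons] at hmem
        rcases hmem with he | hin
        · exact absurd he hne
        · exact hin
      exact (List.Perm.append_left _ (ih _ hnd' h')).trans
        (List.filter_append_perm (fun x => key x == k) l)

lemma nodup_slice_prefix (xs : List String) (b : Int) (h : xs.Nodup) :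
    (PySem.List.slice xs none (some b)).Nodup := by
  by_cases hb : 0 ≤ b
  · rw [PySem.List.slice_to xs hb]
    exact h.sublist (List.take_sublist _ _)
  · have hb' : b = -((b.natAbs : Nat) : Int) := by omega
    rw [hb', PySem.List.slice_to_neg_natCast xs b.natAbs (by omega)]
    exact h.sublist (List.take_sublist _ _)

lemma A_eq (stimuli : List (List (String × String))) (mc mp : Int) :
    apply_fast_filter_py stimuli mc mp =
      pvSel (PySem.List.slice (PySem.Set.ofList (stimuli.map pvConc)) none (some mc)) mp stimuli [] := by
  have h1 : apply_fast_filter_py stimuli mc mp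
      = pvSel (PySem.Set.ofList (PySem.List.slice (PySem.Set.ofList (stimuli.map pvConc)) none (some mc))) mp stimuli [] := by
    have h0 := loopA (PySem.Set.ofList (PySem.List.slice (PySem.Set.ofList (stimuli.map pvConc)) none (some mc)))
      mp stimuli [] PySem.Dict.empty [] (by intro c _; simp [PySem.Dict.getD_empty])
    calc apply_fast_filter_py stimuli mc mp
        = (pvCountFilter (PySem.Set.ofList (PySem.List.slice (pvSeen stimuli) none (some mc))) mp stimuli).2 := rfl
      _ = (pvCountFilter (PySem.Set.ofList (PySem.List.slice (PySem.Set.ofList (stimuli.map pvConc)) none (some mc))) mp stimuli).2 := by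
            rw [seen_eq]
      _ = [] ++ pvSel (PySem.Set.ofList (PySem.List.slice (PySem.Set.ofList (stimuli.map pvConc)) none (some mc))) mp stimuli [] := h0
      _ = _ := List.nil_append _
  rw [h1]
  exact pvSel_congr _ _ mp (fun x => PySem.Set.mem_ofList _ x) stimuli []

lemma B_eq (stimuli : List (List (String × String))) (mc mp : Int) :
    apply_fast_filter_py_alt stimuli mc mp =
      (pvE (PySem.List.slice (PySem.Set.ofList (stimuli.map pvConc)) none (some mc)) mp stimuli).map (fun p => p.2) := by
  have hcs : ((PySem.List.enumerate stimuli 0).map (fun p => pvConc p.2)) = stimuli.map pvConc := by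
    rw [show (fun (p : Int × List (String × String)) => pvConc p.2)
          = (pvConc ∘ (fun p : Int × List (String × String) => p.2)) from rfl]
    rw [← List.map_map, PySem.List.map_snd_enumerate]
  have hkeys : (pvGroups stimuli).keys = PySem.Set.ofList (stimuli.map pvConc) := by
    unfold pvGroups
    rw [PySem.Dict.keys_foldl_modify_key (PySem.List.enumerate stimuli)
      (fun (p : Int × List (String × String)) => pvConc p.2)
      ([] : List (Int × List (String × String)))
      (fun _ p => fun l => l ++ [p]) PySem.Dict.empty]
    rw [PySem.Dict.keys_empty, hcs]
    exact PySem.Set.update_empty _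
  have hget : ∀ c, (pvGroups stimuli).getD c []
      = (PySem.List.enumerate stimuli).filter (fun p => pvConc p.2 == c) := by
    intro c
    have h1 : pvGroups stimuli
        = ((PySem.List.enumerate stimuli).map (fun p => ((pvConc p.2), p))).foldl
            (fun d q => d.modify q.1 [] (fun l => l ++ [q.2])) PySem.Dict.empty := by
      unfold pvGroups
      rw [List.foldl_map]
    rw [h1, PySem.Dict.getD_foldl_modify_append, PySem.Dict.getD_empty, List.nil_append,
      List.filter_map, List.map_map]
    simp [Function.comp_def]
  set K : List String := PySem.List.slice (PySem.Set.ofList (stimuli.map pvConc)) none (some mc) with hK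
  have hpicked : pvPicked (pvGroups stimuli) mc mp
      = K.flatMap (fun c => (PySem.List.enumerate stimuli).filter
          (fun p => pvConc p.2 == c && decide ((((stimuli.map pvConc).take p.1.toNat).count c : Int) < mp))) := by
    unfold pvPicked
    rw [hkeys, ← hK]
    rw [PySem.List.foldl_congr_mem _ _
        (fun acc c => acc ++ (PySem.List.enumerate stimuli).filter
          (fun p => pvConc p.2 == c && decide ((((stimuli.map pvConc).take p.1.toNat).count c : Int) < mp))) _ ?_]
    · rw [PySem.List.foldl_append_eq_flatMap, List.nil_append]
    · intro acc c _
      rw [PySem.List.foldl_append_ite (fun q : Int × (Int × List (String × String)) => q.1 < mp)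
          (fun q => q.2)]
      rw [List.nil_append, hget c, chunk_eq]
  have hKnodup : K.Nodup := nodup_slice_prefix _ mc (PySem.Set.nodup_ofList _)
  have hmemE : ∀ p ∈ pvE K mp stimuli, pvConc p.2 ∈ K := by
    intro p hp
    have := (List.mem_filter.mp hp).2
    unfold pvP at this
    simp only [Bool.and_eq_true, decide_eq_true_eq] at this
    exact this.1
  have hchunks : ∀ c ∈ K, (pvE K mp stimuli).filter (fun p => pvConc p.2 == c)
      = (PySem.List.enumerate stimuli).filter
          (fun p => pvConc p.2 == c && decide ((((stimuli.map pvConc).take p.1.toNat).count c : Int) < mp)) := by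
    intro c hcK
    unfold pvE
    rw [List.filter_filter]
    apply List.filter_congr
    intro p _
    simp only [pvP]
    by_cases hpc : pvConc p.2 = c
    · rw [hpc]
      simp [hcK]
    · have hb : (pvConc p.2 == c) = false := by simp [hpc]
      simp [hb]
  have hperm : (pvE K mp stimuli).Perm (pvPicked (pvGroups stimuli) mc mp) := by
    rw [hpicked, ← pvFlatMap_congr hchunks]
    exact (perm_flatMap (fun p => pvConc p.2) K (pvE K mp stimuli) hKnodup hmemE).symm
  have hpw : (pvE K mp stimuli).Pairwise (fun a b => a.1 < b.1) := by
    unfold pvE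
    exact List.Pairwise.filter _ (PySem.List.pairwise_lt_enumerate stimuli 0)
  simp only [apply_fast_filter_py_alt]
  rw [PySem.List.sorted_eq_of_perm_of_pairwise_lt _ _ (fun t => t.1) hperm hpw]

-- ===== VERDICT (by name: the statement is the Claim_ definition above) =====
theorem apply_fast_filter_py_spec : Claim_equal_apply_fast_filter_py := by
  intro stimuli mc mp _
  unfold Spec_apply_fast_filter_py
  rw [A_eq, B_eq, E_eq_sel]
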